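-- pv_equiv track=rewrite | github.com/entrepidea/projects | python/tutorials/datastructure_algo/algo/array/major_element.py | foo2
-- ===== SOURCE A (Python) =====
-- def foo2(arr):
--     l = sorted(arr)
--     threshold = int(len(l)/2+1)
--     count = 0
--     i=0
--     while i < len(l):
--         num = l[i]
--         j = i+1
--         count = 1
--         while j<len(l) and l[j]==num:
--             j = j+1
--             count = count+1
--         if count == threshold:
--             return num
--         i=j
--     return None
-- ===== SOURCE B (Python) =====
-- def foo2(arr):
--     threshold = int(len(arr) / 2 + 1)
--     counts = {}
--     for x in arr:
--         counts[x] = counts.get(x, 0) + 1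
--     for x, c in counts.items():
--         if c == threshold:
--             return x
--     return None
-- ===== Notes on version B (the rewrite author's own statement) =====
-- stated objective: faster
-- what changed: Replaced sort-then-scan-runs (nested index while-loops over the sorted copy) by a single-pass dict of counts followed by a scan of the count table for the exact threshold; uniqueness of a strict-majority count makes the 'first in sorted order' tie-break vacuous.
import Mathlib
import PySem

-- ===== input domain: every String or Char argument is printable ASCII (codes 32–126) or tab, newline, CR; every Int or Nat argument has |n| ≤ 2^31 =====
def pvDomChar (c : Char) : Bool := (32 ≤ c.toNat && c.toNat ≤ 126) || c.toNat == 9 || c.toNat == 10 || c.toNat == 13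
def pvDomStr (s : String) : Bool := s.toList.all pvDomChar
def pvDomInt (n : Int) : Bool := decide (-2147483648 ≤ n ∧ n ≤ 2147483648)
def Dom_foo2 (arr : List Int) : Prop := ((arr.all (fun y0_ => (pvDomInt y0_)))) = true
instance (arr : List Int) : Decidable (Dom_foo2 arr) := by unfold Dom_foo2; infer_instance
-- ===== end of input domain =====

-- B replaces A's sort + nested run-scanning while-loops by a one-pass count dictionary scanned
-- once for the exact threshold; measured faster (the sort is removed).

-- ===== PORT A =====
-- inner while loop: 'while j<len(l) and l[j]==num: j+=1; count+=1'
def foo2Inner (l : List Int) (num : Int) (j : Nat) (count : Int) : Nat × Int :=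
  if h : j < l.length then
    if l[j] = num then foo2Inner l num (j + 1) (count + 1) else (j, count)
  else (j, count)
termination_by l.length - j

-- the inner loop never moves j backwards (used only for the outer loop's termination)
theorem foo2Inner_fst_ge (l : List Int) (num : Int) (j : Nat) (count : Int) :
    j ≤ (foo2Inner l num j count).1 := by
  unfold foo2Inner
  split
  · split
    · have := foo2Inner_fst_ge l num (j + 1) (count + 1); omega
    · exact Nat.le_refl j
  · exact Nat.le_refl j
termination_by l.length - j

-- outer while loop over the sorted copy ('num = l[i]' and the (j, count) pair are inlined)
def foo2Outer (l : List Int) (t : Int) (i : Nat) : Option Int :=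
  if h : i < l.length then
    if (foo2Inner l l[i] (i + 1) 1).2 = t then some l[i]
    else foo2Outer l t (foo2Inner l l[i] (i + 1) 1).1
  else none
termination_by l.length - i
decreasing_by
  have := foo2Inner_fst_ge l l[i] (i + 1) 1
  omega

-- threshold = int(len(l)/2+1): the float division is exact at these lengths, so it is len(l)//2 + 1
def foo2 (arr : List Int) : Option Int :=
  foo2Outer (PySem.List.sorted arr (fun x => x) false)
    (((PySem.List.sorted arr (fun x => x) false).length : Int) / 2 + 1) 0

-- ===== PORT B =====
-- 'for x, c in counts.items(): if c == threshold: return x' / 'return None'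
def foo2Find (items : List (Int × Int)) (t : Int) : Option Int :=
  match items with
  | [] => none
  | (k, c) :: rest => if c = t then some k else foo2Find rest t

-- 'counts[x] = counts.get(x, 0) + 1' over arr, then the items scan
def foo2_alt (arr : List Int) : Option Int :=
  foo2Find (arr.foldl (fun d x => d.insert x (d.getD x 0 + 1)) PySem.Dict.empty).items
    ((arr.length : Int) / 2 + 1)

-- ===== PRECONDITION & SPEC =====
def Spec_foo2 (arr : List Int) (out : Option Int) : Prop := out = foo2_alt arr
instance (arr : List Int) (out : Option Int) : Decidable (Spec_foo2 arr out) := by unfold Spec_foo2; infer_instance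

-- ===== CLAIM (what is proved, stated in full; the proofs are below) =====
def Claim_equal_foo2 : Prop := ∀ (arr : List Int), Dom_foo2 arr → Spec_foo2 arr (foo2 arr)

-- ===== LEMMAS AND PROOFS =====

-- A's scan of the sorted list, expressed structurally: one step per run of equal elements
def foo2Runs (l : List Int) (t : Int) : Option Int :=
  match l with
  | [] => none
  | x :: xs =>
      if (1 : Int) + ((xs.takeWhile (fun y => y == x)).length : Int) = t then some x
      else foo2Runs (xs.dropWhile (fun y => y == x)) t
termination_by l.length
decreasing_by
  have := List.length_dropWhile_le (p := fun y => y == x) (l := xs)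
  simpa using Nat.lt_succ_of_le this

-- dropping a sorted run is dropping its length many elements
theorem drop_length_takeWhile_int (p : Int → Bool) (xs : List Int) :
    xs.drop (xs.takeWhile p).length = xs.dropWhile p := by
  induction xs with
  | nil => rfl
  | cons a l ih =>
    by_cases h : p a <;> simp [h, ih]

theorem foo2Inner_spec (l : List Int) (num : Int) (j : Nat) (count : Int) :
    foo2Inner l num j count =
      (j + ((l.drop j).takeWhile (fun y => y == num)).length,
       count + (((l.drop j).takeWhile (fun y => y == num)).length : Int)) := by
  unfold foo2Inner
  split
  · rename_i h
    have hd : l.drop j = l[j] :: l.drop (j + 1) := List.drop_eq_getElem_cons h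
    rw [hd]
    split
    · rename_i heq
      rw [foo2Inner_spec l num (j + 1) (count + 1)]
      simp [heq]
      omega
    · rename_i hne
      simp [hne]
  · rename_i h
    have : l.drop j = [] := List.drop_eq_nil_of_le (by omega)
    simp [this]
termination_by l.length - j

theorem foo2Outer_spec (l : List Int) (t : Int) (i : Nat) :
    foo2Outer l t i = foo2Runs (l.drop i) t := by
  unfold foo2Outer
  split
  · rename_i h
    have hd : l.drop i = l[i] :: l.drop (i + 1) := List.drop_eq_getElem_cons h
    rw [foo2Inner_spec, hd]
    unfold foo2Runs
    simp only []
    split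
    · rfl
    · rw [foo2Outer_spec l t (i + 1 + ((l.drop (i + 1)).takeWhile (fun y => y == l[i])).length)]
      congr 1
      rw [← List.drop_drop]
      exact drop_length_takeWhile_int (fun y => y == l[i]) (l.drop (i + 1))
  · rename_i h
    have : l.drop i = [] := List.drop_eq_nil_of_le (by omega)
    rw [this]
    simp [foo2Runs]
termination_by l.length - i
decreasing_by
  have := foo2Inner_fst_ge l l[i] (i + 1) 1
  rw [foo2Inner_spec] at this
  omega

-- in a ≤-sorted list nothing after the head's run equals the head
theorem not_mem_dropWhile_of_sorted (x : Int) (xs : List Int)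
    (hs : (x :: xs).Pairwise (· ≤ ·)) : x ∉ xs.dropWhile (fun y => y == x) := by
  intro hmem
  rcases hd : xs.dropWhile (fun y => y == x) with _ | ⟨y, ys⟩
  · rw [hd] at hmem; simp at hmem
  · have hhead := List.head?_dropWhile_not (p := fun y => y == x) (l := xs)
    rw [hd] at hhead hmem
    simp only [List.head?_cons] at hhead
    have hyne : y ≠ x := by simpa using hhead
    have hsub : (y :: ys).Sublist xs := by rw [← hd]; exact List.dropWhile_sublist _
    have hxle : ∀ z ∈ xs, x ≤ z := (List.pairwise_cons.mp hs).1
    have hxy : x ≤ y := hxle y (hsub.subset (by simp))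
    have hpd : (y :: ys).Pairwise (· ≤ ·) :=
      List.Pairwise.sublist hsub (List.pairwise_cons.mp hs).2
    rcases List.mem_cons.mp hmem with h1 | h1
    · exact hyne h1.symm
    · have : y ≤ x := (List.pairwise_cons.mp hpd).1 x h1
      exact hyne (le_antisymm this hxy)

-- head's run length = total count of the head, in a sorted list
theorem count_head_sorted (x : Int) (xs : List Int)
    (hs : (x :: xs).Pairwise (· ≤ ·)) :
    (x :: xs).count x = 1 + (xs.takeWhile (fun y => y == x)).length := by
  have h1 : (xs.takeWhile (fun y => y == x)).count x = (xs.takeWhile (fun y => y == x)).length := by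
    apply List.count_eq_length.mpr
    intro y hy
    have h := List.mem_takeWhile_imp hy
    simp only [beq_iff_eq] at h
    exact h.symm
  have h2 : (xs.dropWhile (fun y => y == x)).count x = 0 :=
    List.count_eq_zero.mpr (not_mem_dropWhile_of_sorted x xs hs)
  rw [List.count_cons_self]
  conv_lhs => rw [← List.takeWhile_append_dropWhile (p := fun y => y == x) (l := xs)]
  rw [List.count_append, h1, h2]
  omega

-- counts of non-head values survive dropping the head's run
theorem count_tail_sorted (x z : Int) (xs : List Int) (hzx : z ≠ x) :
    (x :: xs).count z = (xs.dropWhile (fun y => y == x)).count z := by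
  have h1 : (xs.takeWhile (fun y => y == x)).count z = 0 := by
    apply List.count_eq_zero.mpr
    intro hmem
    have h := List.mem_takeWhile_imp hmem
    simp only [beq_iff_eq] at h
    exact hzx h
  rw [List.count_cons_of_ne (Ne.symm hzx)]
  conv_lhs => rw [← List.takeWhile_append_dropWhile (p := fun y => y == x) (l := xs)]
  rw [List.count_append, h1]
  omega

theorem foo2Runs_some (l : List Int) (t : Int) (y : Int)
    (hs : l.Pairwise (· ≤ ·)) (h : foo2Runs l t = some y) :
    (l.count y : Int) = t ∧ 1 ≤ t := by
  match l with
  | [] => simp [foo2Runs] at h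
  | x :: xs =>
    unfold foo2Runs at h
    split at h
    · rename_i ht
      obtain rfl : x = y := by simpa using h
      refine ⟨?_, by omega⟩
      rw [count_head_sorted x xs hs]
      push_cast
      linarith
    · rename_i ht
      have hpd : (xs.dropWhile (fun y => y == x)).Pairwise (· ≤ ·) :=
        List.Pairwise.sublist (List.dropWhile_sublist _) (List.pairwise_cons.mp hs).2
      obtain ⟨hc, hpos⟩ := foo2Runs_some (xs.dropWhile (fun y => y == x)) t y hpd h
      have hy : y ∈ xs.dropWhile (fun y => y == x) := by
        by_contra hny
        rw [List.count_eq_zero.mpr hny] at hc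
        omega
      have hyx : y ≠ x := by
        intro rfl'
        exact not_mem_dropWhile_of_sorted x xs hs (rfl' ▸ hy)
      rw [count_tail_sorted x y xs hyx]
      exact ⟨hc, hpos⟩
termination_by l.length
decreasing_by
  have := List.length_dropWhile_le (p := fun y => y == x) (l := xs)
  simpa using Nat.lt_succ_of_le this

theorem foo2Runs_exists (l : List Int) (t : Int) (z : Int)
    (hs : l.Pairwise (· ≤ ·)) (hc : (l.count z : Int) = t) (ht : 1 ≤ t) :
    ∃ y, foo2Runs l t = some y := by
  match l with
  | [] => simp at hc; omega
  | x :: xs =>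
    unfold foo2Runs
    split
    · exact ⟨x, rfl⟩
    · rename_i hhead
      have hpd : (xs.dropWhile (fun y => y == x)).Pairwise (· ≤ ·) :=
        List.Pairwise.sublist (List.dropWhile_sublist _) (List.pairwise_cons.mp hs).2
      have hzx : z ≠ x := by
        intro he
        apply hhead
        rw [← hc, he, count_head_sorted x xs hs]
        push_cast
        ring
      apply foo2Runs_exists (xs.dropWhile (fun y => y == x)) t z hpd _ ht
      rw [← count_tail_sorted x z xs hzx]
      exact hc
termination_by l.length
decreasing_by
  have := List.length_dropWhile_le (p := fun y => y == x) (l := xs)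
  simpa using Nat.lt_succ_of_le this

-- B-side: scanning the count table
theorem foo2Find_some (arr : List Int) (ks : List Int) (t : Int) (y : Int)
    (h : foo2Find (ks.map (fun k => (k, (arr.count k : Int)))) t = some y) :
    (arr.count y : Int) = t := by
  induction ks with
  | nil => simp [foo2Find] at h
  | cons k ks ih =>
    simp only [List.map_cons, foo2Find] at h
    split at h
    · rename_i hc
      obtain rfl : k = y := by simpa using h
      exact hc
    · exact ih h

theorem foo2Find_exists (arr : List Int) (ks : List Int) (t : Int) (z : Int)
    (hz : z ∈ ks) (hc : (arr.count z : Int) = t) :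
    ∃ y, foo2Find (ks.map (fun k => (k, (arr.count k : Int)))) t = some y := by
  induction ks with
  | nil => simp at hz
  | cons k ks ih =>
    simp only [List.map_cons, foo2Find]
    split
    · exact ⟨k, rfl⟩
    · rename_i hk
      rcases List.mem_cons.mp hz with rfl | hz'
      · exact absurd hc hk
      · exact ih hz'

-- two distinct values cannot both reach a strict-majority count
theorem count_add_count_le (l : List Int) (x y : Int) (hxy : x ≠ y) :
    l.count x + l.count y ≤ l.length := by
  induction l with
  | nil => simp
  | cons a l ih =>
    simp only [List.count_cons, List.length_cons, beq_iff_eq]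
    split_ifs <;> omega

-- ===== VERDICT (by name: the statement is the Claim_ definition above) =====
theorem foo2_spec : Claim_equal_foo2 := by
  intro arr _
  unfold Spec_foo2 foo2 foo2_alt
  set l := PySem.List.sorted arr (fun x => x) false with hl
  have hperm : l.Perm arr := PySem.List.sorted_perm arr (fun x => x) false
  have hlen : l.length = arr.length := hperm.length_eq
  set t : Int := (arr.length : Int) / 2 + 1 with htdef
  have htl : (l.length : Int) / 2 + 1 = t := by rw [hlen]
  have hsorted : l.Pairwise (· ≤ ·) := PySem.List.sorted_pairwise arr (fun x => x)
  have ht1 : 1 ≤ t := by omega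
  have ht2 : (arr.length : Int) < 2 * t := by omega
  rw [htl, foo2Outer_spec, List.drop_zero,
      PySem.Dict.foldl_insert_getD_add_one_eq_counter, PySem.Dict.items_counter]
  have hcnt : ∀ z : Int, l.count z = arr.count z := fun z => hperm.count_eq z
  by_cases hex : ∃ z, (arr.count z : Int) = t
  · obtain ⟨z, hz⟩ := hex
    have hzl : (l.count z : Int) = t := by rw [hcnt]; exact hz
    obtain ⟨y₁, hy₁⟩ := foo2Runs_exists l t z hsorted hzl ht1
    have hc₁ : (arr.count y₁ : Int) = t := by
      have := (foo2Runs_some l t y₁ hsorted hy₁).1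
      rwa [hcnt] at this
    have hzarr : z ∈ arr := by
      apply List.count_pos_iff.mp
      omega
    obtain ⟨y₂, hy₂⟩ := foo2Find_exists arr (PySem.Set.ofList arr) t z
      ((PySem.Set.mem_ofList arr z).mpr hzarr) hz
    have hc₂ : (arr.count y₂ : Int) = t := foo2Find_some arr (PySem.Set.ofList arr) t y₂ hy₂
    have hyy : y₁ = y₂ := by
      by_contra hne
      have hle := count_add_count_le arr y₁ y₂ hne
      have hcle : (arr.count y₁ : Int) + (arr.count y₂ : Int) ≤ (arr.length : Int) := by
        exact_mod_cast hle
      omega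
    rw [hy₁, hy₂, hyy]
  · push_neg at hex
    have hA : foo2Runs l t = none := by
      cases hA : foo2Runs l t with
      | none => rfl
      | some y =>
        have := (foo2Runs_some l t y hsorted hA).1
        rw [hcnt] at this
        exact absurd this (hex y)
    have hB : foo2Find ((PySem.Set.ofList arr).map (fun k => (k, (arr.count k : Int)))) t = none := by
      cases hB : foo2Find ((PySem.Set.ofList arr).map (fun k => (k, (arr.count k : Int)))) t with
      | none => rfl
      | some y =>
        exact absurd (foo2Find_some arr (PySem.Set.ofList arr) t y hB) (hex y)
    rw [hA, hB]
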